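-- pv_equiv track=rewrite | github.com/aratik711/DSA-for-coding-interviews | data-structure/string/unique.py | is_unique_3
-- ===== SOURCE A (Python) =====
-- def is_unique_3(str):
--     alpha = "ABCDEFGHIJKLMNOPQRSTUVWXYZabcdefghijklmnopqrstuvwxyz "
--     for i in str:
--         if i in alpha:
--             alpha = alpha.replace(i, "")
--         else:
--             return False
--     return True
-- ===== SOURCE B (Python) =====
-- ALLOWED = set("ABCDEFGHIJKLMNOPQRSTUVWXYZabcdefghijklmnopqrstuvwxyz ")
--
-- def is_unique_3(str):
--     return len(set(str)) == len(str) and all(c in ALLOWED for c in str)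
-- ===== Notes on version B (the rewrite author's own statement) =====
-- stated objective: simpler
-- what changed: Replaced A's single loop that incrementally deletes each seen character from a mutating alphabet string with two separate declarative checks: uniqueness via len(set(s)) == len(s) and allowedness via all(c in ALLOWED) against a fixed set built once.
import Mathlib
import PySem

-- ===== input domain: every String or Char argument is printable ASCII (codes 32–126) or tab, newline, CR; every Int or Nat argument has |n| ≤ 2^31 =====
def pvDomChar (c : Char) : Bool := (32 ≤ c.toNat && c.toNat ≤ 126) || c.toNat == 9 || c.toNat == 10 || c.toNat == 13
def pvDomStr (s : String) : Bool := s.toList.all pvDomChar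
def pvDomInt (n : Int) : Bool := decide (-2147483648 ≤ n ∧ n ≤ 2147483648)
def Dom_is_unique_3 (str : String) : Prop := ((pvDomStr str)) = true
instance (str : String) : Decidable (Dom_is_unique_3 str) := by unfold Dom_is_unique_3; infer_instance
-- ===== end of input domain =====

-- B is a simpler decomposition: a fixed allowed set built once, uniqueness via len(set(s)) == len(s),
-- allowedness via all(c in ALLOWED), instead of A's loop that mutates the alphabet string.

-- ===== PORT A =====
-- A's loop: alpha holds the characters that are allowed and not yet seen;
-- alpha.replace(i, "") for the single char i removes every occurrence of i = List.filter (· != i)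
def isuLoopA : List Char → List Char → Bool
  | _, [] => true
  | alpha, c :: cs =>
      if alpha.contains c then isuLoopA (alpha.filter (fun d => d != c)) cs
      else false

def is_unique_3 (str : String) : Bool :=
  isuLoopA "ABCDEFGHIJKLMNOPQRSTUVWXYZabcdefghijklmnopqrstuvwxyz ".toList str.toList

-- ===== PORT B =====
-- ALLOWED = set("ABC…z ") built once at module level
def pvAllowed : PySem.Set Char :=
  PySem.Set.ofList "ABCDEFGHIJKLMNOPQRSTUVWXYZabcdefghijklmnopqrstuvwxyz ".toList

-- len(set(str)) == len(str) and all(c in ALLOWED for c in str)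
def is_unique_3_alt (str : String) : Bool :=
  ((PySem.Set.ofList str.toList).length == str.toList.length)
    && str.toList.all (fun c => pvAllowed.contains c)

-- ===== PRECONDITION & SPEC =====
def Spec_is_unique_3 (str : String) (out : Bool) : Prop := out = is_unique_3_alt str
instance (str : String) (out : Bool) : Decidable (Spec_is_unique_3 str out) := by unfold Spec_is_unique_3; infer_instance

-- ===== CLAIM (what is proved, stated in full; the proofs are below) =====
def Claim_equal_is_unique_3 : Prop := ∀ (str : String), Dom_is_unique_3 str → Spec_is_unique_3 str (is_unique_3 str)

-- ===== LEMMAS AND PROOFS =====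

-- A's loop returns true iff every char is in the current alphabet and the chars are pairwise distinct
theorem isuLoopA_eq_true_iff (cs alpha : List Char) :
    isuLoopA alpha cs = true ↔ (∀ c ∈ cs, c ∈ alpha) ∧ cs.Nodup := by
  induction cs generalizing alpha with
  | nil => simp [isuLoopA]
  | cons c cs ih =>
      rw [isuLoopA]
      by_cases hc : c ∈ alpha
      · have hct : alpha.contains c = true := List.contains_iff_mem.mpr hc
        rw [hct, if_pos rfl, ih]
        simp only [List.mem_filter, List.mem_cons, List.nodup_cons, bne_iff_ne, ne_eq]
        constructor
        · rintro ⟨h1, h2⟩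
          refine ⟨fun d hd => ?_, fun hmem => (h1 c hmem).2 rfl, h2⟩
          rcases hd with rfl | hd
          · exact hc
          · exact (h1 d hd).1
        · rintro ⟨h1, h2, h3⟩
          exact ⟨fun d hd => ⟨h1 d (Or.inr hd), fun h => h2 (h ▸ hd)⟩, h3⟩
      · have hct : alpha.contains c = false := by
          simpa [List.contains_iff_mem] using hc
        rw [hct]
        simp [hc]

-- folding Set.add never grows the accumulator by more than the number of elements folded in
theorem foldl_add_len_le (xs s : List Char) :
    (xs.foldl PySem.Set.add s).length ≤ s.length + xs.length := by
  induction xs generalizing s with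
  | nil => simp
  | cons x xs ih =>
      rw [List.foldl_cons, PySem.Set.add, PySem.Set.contains]
      by_cases hx : List.contains s x = true
      · rw [if_pos hx]
        have := ih s
        simp only [List.length_cons]; omega
      · rw [if_neg hx]
        have := ih (s ++ [x])
        simp only [List.length_append, List.length_cons, List.length_nil] at *
        omega

-- folding Set.add reaches the maximal size iff the folded list is duplicate-free and disjoint from the start
theorem foldl_add_length_eq_iff (xs s : List Char) :
    ((xs.foldl PySem.Set.add s).length = s.length + xs.length) ↔
      (xs.Nodup ∧ ∀ x ∈ xs, x ∉ s) := by
  induction xs generalizing s with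
  | nil => simp
  | cons x xs ih =>
      rw [List.foldl_cons, PySem.Set.add, PySem.Set.contains]
      by_cases hx : x ∈ s
      · rw [if_pos (List.contains_iff_mem.mpr hx)]
        have hle := foldl_add_len_le xs s
        simp only [List.length_cons]
        constructor
        · intro h; omega
        · rintro ⟨_, h2⟩
          exact absurd hx (h2 x List.mem_cons_self)
      · rw [if_neg (by simpa [List.contains_iff_mem] using hx)]
        have heq : s.length + (x :: xs).length = (s ++ [x]).length + xs.length := by
          simp; omega
        rw [heq, ih]
        simp only [List.nodup_cons, List.mem_append, List.mem_cons, List.not_mem_nil, or_false]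
        constructor
        · rintro ⟨h1, h2⟩
          refine ⟨⟨fun hxm => (h2 x hxm) (Or.inr rfl), h1⟩, fun y hy => ?_⟩
          rcases hy with rfl | hy
          · exact hx
          · intro hys; exact (h2 y hy) (Or.inl hys)
        · rintro ⟨⟨h1, h2⟩, h3⟩
          refine ⟨h2, fun y hy hmem => ?_⟩
          rcases hmem with hys | rfl
          · exact (h3 y (Or.inr hy)) hys
          · exact h1 hy

theorem mem_pvAllowed_iff (c : Char) :
    pvAllowed.contains c = true ↔
      c ∈ "ABCDEFGHIJKLMNOPQRSTUVWXYZabcdefghijklmnopqrstuvwxyz ".toList := by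
  rw [pvAllowed, PySem.Set.contains, List.contains_iff_mem, PySem.Set.mem_ofList]

theorem alt_eq_true_iff (str : String) :
    is_unique_3_alt str = true ↔
      ((∀ c ∈ str.toList,
          c ∈ "ABCDEFGHIJKLMNOPQRSTUVWXYZabcdefghijklmnopqrstuvwxyz ".toList) ∧
        str.toList.Nodup) := by
  rw [is_unique_3_alt, Bool.and_eq_true, beq_iff_eq, List.all_eq_true]
  have hlen : ((PySem.Set.ofList str.toList).length = str.toList.length) ↔ str.toList.Nodup := by
    have h := foldl_add_length_eq_iff str.toList []
    simp only [List.length_nil, Nat.zero_add, List.not_mem_nil, not_false_iff,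
      implies_true, and_true] at h
    exact h
  rw [hlen]
  constructor
  · rintro ⟨h1, h2⟩
    exact ⟨fun c hc => (mem_pvAllowed_iff c).mp (h2 c hc), h1⟩
  · rintro ⟨h1, h2⟩
    exact ⟨h2, fun c hc => (mem_pvAllowed_iff c).mpr (h1 c hc)⟩

-- ===== VERDICT (by name: the statement is the Claim_ definition above) =====
theorem is_unique_3_spec : Claim_equal_is_unique_3 := by
  intro str _
  unfold Spec_is_unique_3
  rw [Bool.eq_iff_iff, is_unique_3, isuLoopA_eq_true_iff, alt_eq_true_iff]
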